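-- pv_equiv track=rewrite | github.com/zpeterg/bmig_5003_parse_words_to_db | format.py | formatToLines
-- ===== SOURCE A (Python) =====
-- def formatToLines(arr):
--     targetLen = 17
--     targetCol = 3
--     rtn = []
--     onLine = 0
--     onCol = 0
--     for word in arr:
--         wordLen = len(word)
--         # if line doesn't exist yet in return, add it
--         if onLine > (len(rtn) - 1):
--             rtn.append('')
--         # create padding string of spaces
--         padding = ' ' * (targetLen - wordLen)
--         # add padding and push to array
--         rtn[onLine] += f'{word}{padding}'
--         # move to next column
--         onCol += 1
--         # If maxed-out on lines, start new line
--         if onCol >= targetCol: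
--             onCol = 0
--             onLine += 1
--     return rtn
-- ===== SOURCE B (Python) =====
-- def formatToLines(arr):
--     return [''.join(f"{w}{' ' * (17 - len(w))}" for w in arr[i:i+3])
--             for i in range(0, len(arr), 3)]
-- ===== Notes on version B (the rewrite author's own statement) =====
-- stated objective: simpler
-- what changed: Replaces the onLine/onCol counters and conditional in-place growth of the result with a single comprehension over fixed-size chunks arr[i:i+3], joining the padded words of each chunk into one line.
import Mathlib
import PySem

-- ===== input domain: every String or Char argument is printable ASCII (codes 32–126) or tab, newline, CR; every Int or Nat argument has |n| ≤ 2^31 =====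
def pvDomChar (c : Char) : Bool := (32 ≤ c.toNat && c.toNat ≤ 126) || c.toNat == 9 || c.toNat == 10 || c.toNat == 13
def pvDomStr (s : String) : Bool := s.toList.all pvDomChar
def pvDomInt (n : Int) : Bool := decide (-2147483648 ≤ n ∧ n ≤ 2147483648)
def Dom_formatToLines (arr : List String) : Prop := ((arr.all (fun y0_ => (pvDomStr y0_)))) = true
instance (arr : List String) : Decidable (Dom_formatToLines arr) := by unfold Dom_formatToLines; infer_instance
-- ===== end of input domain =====

-- B replaces A's onLine/onCol counters and conditional line creation with one comprehension
-- over fixed-size chunks arr[i:i+3]; objective: simpler.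

-- ===== PORT A =====
-- one iteration of A's for-loop over (rtn, onLine, onCol); Python's rtn[onLine] += … is
-- ported with set/getD at the Nat index onLine (A keeps 0 ≤ onLine ≤ len rtn invariantly,
-- appending '' exactly when onLine = len rtn, so the Nat index equals Python's index)
def stepA (st : List String × Nat × Nat) (word : String) : List String × Nat × Nat :=
  let rtn := st.1
  let onLine := st.2.1
  let onCol := st.2.2
  let wordLen : Int := word.toList.length          -- len(word), code points
  let rtn1 := if (onLine : Int) > (rtn.length : Int) - 1 then rtn ++ [""] else rtn
  let padding : String := String.ofList (List.replicate (17 - wordLen).toNat ' ')   -- ' ' * (17 - wordLen)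
  let rtn2 := rtn1.set onLine ((rtn1.getD onLine "") ++ (word ++ padding))      -- rtn[onLine] += f'{word}{padding}'
  let onCol1 := onCol + 1
  if onCol1 ≥ 3 then (rtn2, onLine + 1, 0) else (rtn2, onLine, onCol1)

def formatToLines (arr : List String) : List String :=
  (arr.foldl stepA (([] : List String), 0, 0)).1

-- ===== PORT B =====
-- f"{w}{' ' * (17 - len(w))}"
def pyPad (w : String) : String := String.ofList (List.replicate ((17 - (w.toList.length : Int)).toNat) ' ')
def pyFmt (w : String) : String := w ++ pyPad w
-- ''.join(pyFmt w for w in chunk)   (String.join is foldl (++) "", exactly ''.join)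
def lineOf (chunk : List String) : String := String.join (chunk.map pyFmt)

def formatToLines_alt (arr : List String) : List String :=
  (PySem.List.pyRange 0 arr.length 3).map
    (fun i => lineOf (PySem.List.slice arr (some i) (some (i + 3))))

-- ===== PRECONDITION & SPEC =====
def Spec_formatToLines (arr : List String) (out : List String) : Prop := out = formatToLines_alt arr
instance (arr : List String) (out : List String) : Decidable (Spec_formatToLines arr out) := by unfold Spec_formatToLines; infer_instance

-- ===== CLAIM (what is proved, stated in full; the proofs are below) =====
def Claim_equal_formatToLines : Prop := ∀ (arr : List String), Dom_formatToLines arr → Spec_formatToLines arr (formatToLines arr)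

-- ===== LEMMAS AND PROOFS =====

lemma set_append_len {α : Type} (l : List α) (x y : α) :
    (l ++ [x]).set l.length y = l ++ [y] := by
  induction l with
  | nil => simp
  | cons a t ih => simp [List.set, ih]

lemma getD_append_len {α : Type} (l : List α) (x d : α) :
    (l ++ [x]).getD l.length d = x := by
  induction l with
  | nil => simp [List.getD]
  | cons a t ih => simpa [List.getD] using ih

lemma stepA_0 (rtn : List String) (w : String) :
    stepA (rtn, rtn.length, 0) w = (rtn ++ ["" ++ pyFmt w], rtn.length, 1) := by
  have h : ((rtn.length : Int) > (rtn.length : Int) - 1) := by omega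
  simp [stepA, h, set_append_len, getD_append_len, pyFmt, pyPad]

lemma stepA_1 (rtn : List String) (x w : String) :
    stepA (rtn ++ [x], rtn.length, 1) w = (rtn ++ [x ++ pyFmt w], rtn.length, 2) := by
  simp [stepA, pyFmt, pyPad]

lemma stepA_2 (rtn : List String) (x w : String) :
    stepA (rtn ++ [x], rtn.length, 2) w = (rtn ++ [x ++ pyFmt w], rtn.length + 1, 0) := by
  simp [stepA, pyFmt, pyPad]

lemma pyRange3_nil (a b : Int) (h : b ≤ a) : PySem.List.pyRange a b 3 = [] := by
  rw [PySem.List.pyRange_of_pos a b (by norm_num)]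
  simp [show ¬ a < b by omega]

lemma pyRange3_cons (a b : Int) (h : a < b) :
    PySem.List.pyRange a b 3 = a :: PySem.List.pyRange (a + 3) b 3 := by
  rw [PySem.List.pyRange_of_pos a b (by norm_num),
      PySem.List.pyRange_of_pos (a + 3) b (by norm_num)]
  by_cases h3 : a + 3 < b
  · have hc : ((b - a + 3 - 1) / 3).toNat = ((b - (a + 3) + 3 - 1) / 3).toNat + 1 := by omega
    rw [if_pos h, if_pos h3, hc, List.range_succ_eq_map, List.map_cons, List.map_map]
    refine congrArg₂ _ (by simp) (List.map_congr_left fun k _ => ?_)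
    simp [Nat.succ_eq_add_one]
    ring
  · have hc : ((b - a + 3 - 1) / 3).toNat = 1 := by omega
    rw [if_pos h, if_neg h3, hc]
    simp

lemma pyRange3_shift (a b : Int) :
    PySem.List.pyRange (a + 3) (b + 3) 3 = (PySem.List.pyRange a b 3).map (· + 3) := by
  rw [PySem.List.pyRange_of_pos a b (by norm_num),
      PySem.List.pyRange_of_pos (a + 3) (b + 3) (by norm_num)]
  have he : a + 3 < b + 3 ↔ a < b := by omega
  have hc : b + 3 - (a + 3) = b - a := by ring
  simp only [he, hc, List.map_map]
  exact List.map_congr_left fun k _ => by simp; ring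

lemma slice_shift {α : Type} (xs : List α) (i : Int) (hi : 0 ≤ i) :
    PySem.List.slice xs (some (i + 3)) (some (i + 3 + 3))
      = PySem.List.slice (xs.drop 3) (some i) (some (i + 3)) := by
  rw [PySem.List.slice_toNat _ (by omega) (by omega),
      PySem.List.slice_toNat _ hi (by omega)]
  rw [List.drop_drop]
  congr 1
  · omega
  · congr 1; omega

lemma alt_nil : formatToLines_alt [] = [] := by
  simp [formatToLines_alt, pyRange3_nil 0 0 le_rfl]

lemma alt_cons3 (arr : List String) (h : arr ≠ []) :
    formatToLines_alt arr = lineOf (arr.take 3) :: formatToLines_alt (arr.drop 3) := by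
  have hn : 0 < arr.length := List.length_pos_iff.2 h
  unfold formatToLines_alt
  rw [pyRange3_cons 0 arr.length (by exact_mod_cast hn), List.map_cons]
  congr 1
  · rw [show (0 : Int) + 3 = ((3 : Nat) : Int) by norm_num,
        PySem.List.slice_zero_start, PySem.List.slice_to_natCast]
  · by_cases h3 : 3 ≤ arr.length
    · have hd : ((arr.drop 3).length : Int) = (arr.length : Int) - 3 := by
        simp [List.length_drop]; omega
      rw [hd, show (0 : Int) + 3 = 0 + 3 by rfl,
          show PySem.List.pyRange (0 + 3) (arr.length) 3
             = PySem.List.pyRange (0 + 3) (((arr.length : Int) - 3) + 3) 3 by norm_num,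
          pyRange3_shift, List.map_map]
      refine List.map_congr_left fun i hi => ?_
      have hi0 : 0 ≤ i := by
        rw [PySem.List.pyRange_of_pos 0 ((arr.length : Int) - 3) (by norm_num)] at hi
        obtain ⟨k, _, rfl⟩ := List.mem_map.1 hi
        positivity
      simp only [Function.comp]
      rw [slice_shift arr i hi0]
    · have hd : arr.drop 3 = [] := List.drop_eq_nil_of_le (by omega)
      rw [hd]
      rw [show (0 : Int) + 3 = 3 by norm_num, pyRange3_nil 3 arr.length (by exact_mod_cast (by omega : arr.length ≤ 3))]
      simp [pyRange3_nil 0 0 le_rfl]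

lemma foldA (n : Nat) : ∀ (arr rtn : List String), arr.length ≤ n →
    (List.foldl stepA (rtn, rtn.length, 0) arr).1 = rtn ++ formatToLines_alt arr := by
  induction n with
  | zero =>
    intro arr rtn h
    have : arr = [] := List.length_eq_zero_iff.1 (Nat.le_zero.1 h)
    subst this; simp [alt_nil]
  | succ n ih =>
    intro arr rtn h
    match arr with
    | [] => simp [alt_nil]
    | [a] =>
      rw [alt_cons3 _ (by simp)]
      simp [List.foldl, stepA_0, lineOf, String.join, alt_nil]
    | [a, b] =>
      rw [alt_cons3 _ (by simp)]
      simp only [List.foldl, stepA_0, stepA_1]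
      simp [lineOf, String.join, alt_nil]
    | a :: b :: c :: rest =>
      rw [alt_cons3 _ (by simp)]
      simp only [List.foldl, stepA_0, stepA_1, stepA_2]
      have hlen : rtn.length + 1 = (rtn ++ [(("" ++ pyFmt a) ++ pyFmt b) ++ pyFmt c]).length := by simp
      rw [hlen, ih rest _ (by simp at h; omega)]
      simp [lineOf, String.join]

-- ===== VERDICT (by name: the statement is the Claim_ definition above) =====
theorem formatToLines_spec : Claim_equal_formatToLines := by
  intro arr _
  unfold Spec_formatToLines formatToLines
  have := foldA arr.length arr [] le_rfl
  simpa using this
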